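-- pv_equiv track=rewrite | github.com/shen8424/CAP | import_cap.py | process_candidates
-- ===== SOURCE A (Python) =====
-- def process_candidates(candidates):
--     """Optimized candidate key processing"""
--     keys = list(candidates.keys())
--     sorted_keys = sorted(keys, key=lambda x: -len(x))
--     reserved = []
--
--     reserved_set = set()
--     for key in sorted_keys:
--         if not any(key in rk for rk in reserved_set):
--             reserved.append(key)
--             reserved_set.add(key)
--     return reserved
-- ===== SOURCE B (Python) =====
-- def process_candidates(candidates):
--     """Keep keys that are not substrings of any strictly longer key.
--
--     Equivalent closed-form filter: a key is dropped by the greedy pass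
--     iff some strictly longer key contains it, so one stable sort plus a
--     single filter against the whole key list suffices -- no growing
--     'reserved' set is needed.
--     """
--     keys = sorted(candidates, key=lambda k: -len(k))
--     return [k for k in keys
--             if not any(len(o) > len(k) and k in o for o in keys)]
-- ===== Notes on version B (the rewrite author's own statement) =====
-- stated objective: simpler
-- what changed: Replaces the greedy loop with a growing reserved set by one stateless filter of the sorted keys against a closed-form criterion ('some strictly longer key contains it'), proved equivalent to the incremental greedy pass.
import Mathlib
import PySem

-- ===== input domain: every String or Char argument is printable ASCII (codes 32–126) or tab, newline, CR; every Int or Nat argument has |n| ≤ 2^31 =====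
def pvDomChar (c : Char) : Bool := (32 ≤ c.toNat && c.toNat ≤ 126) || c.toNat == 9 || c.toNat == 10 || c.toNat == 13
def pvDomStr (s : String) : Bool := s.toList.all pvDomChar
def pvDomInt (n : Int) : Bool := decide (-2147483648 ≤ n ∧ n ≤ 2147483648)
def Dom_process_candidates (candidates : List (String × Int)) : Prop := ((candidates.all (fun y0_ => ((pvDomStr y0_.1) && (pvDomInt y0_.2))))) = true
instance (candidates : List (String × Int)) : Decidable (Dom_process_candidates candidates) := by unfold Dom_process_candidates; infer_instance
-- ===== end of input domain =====

-- B replaces A's greedy loop with a growing reserved set by one stateless filter of the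
-- sorted keys against the closed-form criterion "some strictly longer key contains it"
-- (objective: simpler; same asymptotic cost).

-- ===== PORT A =====
def process_candidates (candidates : List (String × Int)) : List String :=
  -- keys = list(candidates.keys())  (dict keys: first occurrences, in order)
  let keys := PySem.List.dedup (candidates.map Prod.fst)
  -- sorted_keys = sorted(keys, key=lambda x: -len(x))
  let sorted_keys := PySem.List.sorted keys (fun x => -PySem.Str.len x)
  -- reserved = []; reserved_set = set(); for key in sorted_keys: ...
  let r := sorted_keys.foldl
    (fun (st : List String × PySem.Set String) key =>
      if !(st.2.any fun rk => PySem.Str.isIn key rk) then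
        (st.1 ++ [key], st.2.add key)
      else st)
    ([], PySem.Set.empty)
  r.1

-- ===== PORT B =====
def process_candidates_alt (candidates : List (String × Int)) : List String :=
  -- keys = sorted(candidates, key=lambda k: -len(k))
  let keys := PySem.List.sorted (PySem.List.dedup (candidates.map Prod.fst)) (fun k => -PySem.Str.len k)
  -- [k for k in keys if not any(len(o) > len(k) and k in o for o in keys)]
  keys.filter fun k =>
    !(keys.any fun o => decide (PySem.Str.len k < PySem.Str.len o) && PySem.Str.isIn k o)

-- ===== PRECONDITION & SPEC =====
def Spec_process_candidates (candidates : List (String × Int)) (out : List String) : Prop := out = process_candidates_alt candidates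
instance (candidates : List (String × Int)) (out : List String) : Decidable (Spec_process_candidates candidates out) := by unfold Spec_process_candidates; infer_instance

-- ===== CLAIM (what is proved, stated in full; the proofs are below) =====
def Claim_equal_process_candidates : Prop := ∀ (candidates : List (String × Int)), Dom_process_candidates candidates → Spec_process_candidates candidates (process_candidates candidates)

-- ===== LEMMAS AND PROOFS =====

-- B's filter predicate: no strictly longer key of L contains k.
def pcKeep (L : List String) (k : String) : Bool :=
  !(L.any fun o => decide (PySem.Str.len k < PySem.Str.len o) && PySem.Str.isIn k o)

-- A's loop body.
def pcStep (st : List String × PySem.Set String) (key : String) : List String × PySem.Set String :=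
  if !(st.2.any fun rk => PySem.Str.isIn key rk) then (st.1 ++ [key], st.2.add key) else st

-- a nonempty list has an element of maximal length
theorem pcExistsMax (f : String → Int) (xs : List String) (h : xs ≠ []) :
    ∃ m ∈ xs, ∀ y ∈ xs, f y ≤ f m := by
  induction xs with
  | nil => exact absurd rfl h
  | cons a t ih =>
    rcases t with _ | ⟨b, t'⟩
    · exact ⟨a, by simp, by simp⟩
    · obtain ⟨m, hm, hmax⟩ := ih (by simp)
      by_cases hle : f a ≤ f m
      · exact ⟨m, List.mem_cons_of_mem _ hm, by
          intro y hy; rcases List.mem_cons.mp hy with rfl | hy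
          · exact hle
          · exact hmax y hy⟩
      · exact ⟨a, List.mem_cons_self, by
          intro y hy; rcases List.mem_cons.mp hy with rfl | hy
          · exact le_refl _
          · exact le_trans (hmax y hy) (le_of_not_ge hle)⟩

-- substring of an equally long string is that string
theorem pcInfix_eq_of_len (k o : String)
    (hin : PySem.Str.isIn k o = true) (hlen : PySem.Str.len k = PySem.Str.len o) : k = o := by
  have hinf := (PySem.Str.isIn_iff_infix k o).mp hin
  have : k.toList = o.toList := by
    refine hinf.sublist.eq_of_length ?_
    simpa [PySem.Str.len] using hlen
  exact String.toList_inj.mp this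

-- the key step equivalence: at the moment A processes k (with prefix P already done),
-- "k is contained in some reserved key" equals "some strictly longer key of L contains k".
theorem pcAny_iff (L P R : List String) (k : String)
    (hnd : L.Nodup)
    (hdesc : L.Pairwise (fun a b => PySem.Str.len b ≤ PySem.Str.len a))
    (hL : L = P ++ k :: R) :
    ((P.filter (pcKeep L)).any fun rk => PySem.Str.isIn k rk) = !(pcKeep L k) := by
  have hkP : k ∉ P := by
    subst hL
    intro hkP
    exact (List.disjoint_of_nodup_append hnd) hkP (by simp)
  rw [pcKeep, Bool.not_not]
  rcases hany : (P.filter (pcKeep L)).any fun rk => PySem.Str.isIn k rk with _ | _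
  · -- any over reserved is false: show the global any is false
    symm
    rw [List.any_eq_false]
    rintro o hoL hprop
    simp only [Bool.and_eq_true, decide_eq_true_eq] at hprop
    obtain ⟨hlt, hin⟩ := hprop
    -- take a longest key of L that contains k
    have hSne : L.filter (fun o => decide (PySem.Str.len k < PySem.Str.len o) && PySem.Str.isIn k o) ≠ [] := by
      intro hnil
      have hmem : o ∈ L.filter (fun o => decide (PySem.Str.len k < PySem.Str.len o) && PySem.Str.isIn k o) :=
        List.mem_filter.mpr ⟨hoL, by simp only [Bool.and_eq_true, decide_eq_true_eq]; exact ⟨hlt, hin⟩⟩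
      rw [hnil] at hmem; exact absurd hmem (List.not_mem_nil)
    obtain ⟨m, hmS, hmax⟩ := pcExistsMax PySem.Str.len _ hSne
    have hmS' := List.mem_filter.mp hmS
    have hmL : m ∈ L := hmS'.1
    have hmlt : PySem.Str.len k < PySem.Str.len m := by
      have := hmS'.2; simp only [Bool.and_eq_true, decide_eq_true_eq] at this; exact this.1
    have hmin : PySem.Str.isIn k m = true := by
      have := hmS'.2; simp only [Bool.and_eq_true, decide_eq_true_eq] at this; exact this.2
    -- m is in P (it is strictly longer than k, and L is length-descending)
    have hmP : m ∈ P := by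
      subst hL
      rcases List.mem_append.mp hmL with h | h
      · exact h
      · rcases List.mem_cons.mp h with rfl | h
        · exact absurd rfl (ne_of_gt hmlt)
        · -- m after k: len m ≤ len k, contradiction
          have hP := (List.pairwise_append.mp hdesc).2.1
          have := (List.pairwise_cons.mp hP).1 m h
          omega
    -- m is kept by the closed-form criterion (it is a longest container of k)
    have hmKeep : pcKeep L m = true := by
      rw [pcKeep, Bool.not_eq_eq_eq_not, Bool.not_true, List.any_eq_false]
      rintro o' ho'L hprop'
      simp only [Bool.and_eq_true, decide_eq_true_eq] at hprop'
      obtain ⟨hlt', hin'⟩ := hprop'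
      have hin'' : PySem.Str.isIn k o' = true := by
        rw [PySem.Str.isIn_iff_infix]
        exact ((PySem.Str.isIn_iff_infix k m).mp hmin).trans
          ((PySem.Str.isIn_iff_infix m o').mp hin')
      have : PySem.Str.len o' ≤ PySem.Str.len m :=
        hmax o' (List.mem_filter.mpr ⟨ho'L,
          by simp only [Bool.and_eq_true, decide_eq_true_eq]; exact ⟨by omega, hin''⟩⟩)
      omega
    -- so the reserved-set any should have fired
    have : ((P.filter (pcKeep L)).any fun rk => PySem.Str.isIn k rk) = true :=
      List.any_eq_true.mpr ⟨m, List.mem_filter.mpr ⟨hmP, hmKeep⟩, hmin⟩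
    rw [hany] at this; exact absurd this (by simp)
  · -- any over reserved is true: produce a strictly longer container in L
    symm
    rw [List.any_eq_true] at hany ⊢
    obtain ⟨rk, hrk, hin⟩ := hany
    have hrkP := List.mem_filter.mp hrk
    refine ⟨rk, by subst hL; exact List.mem_append.mpr (Or.inl hrkP.1), ?_⟩
    have hle : PySem.Str.len k ≤ PySem.Str.len rk := by
      have := ((PySem.Str.isIn_iff_infix k rk).mp hin).length_le
      simp only [PySem.Str.len]; exact_mod_cast this
    have hne : k ≠ rk := fun h => hkP (h ▸ hrkP.1)
    have hlt : PySem.Str.len k < PySem.Str.len rk := by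
      rcases lt_or_eq_of_le hle with h | h
      · exact h
      · exact absurd (pcInfix_eq_of_len k rk hin h) hne
    simp only [Bool.and_eq_true, decide_eq_true_eq]
    exact ⟨hlt, hin⟩

-- A's loop, started after prefix P, produces the closed-form filter of L.
theorem pcLoop_eq (L : List String)
    (hnd : L.Nodup)
    (hdesc : L.Pairwise (fun a b => PySem.Str.len b ≤ PySem.Str.len a)) :
    ∀ (R P : List String), L = P ++ R →
      (R.foldl pcStep (P.filter (pcKeep L), P.filter (pcKeep L))).1 = L.filter (pcKeep L) := by
  intro R
  induction R with
  | nil => intro P hL; subst hL; simp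
  | cons k R' ih =>
    intro P hL
    have hkP : k ∉ P.filter (pcKeep L) := by
      intro h
      have hkP' : k ∈ P := (List.mem_filter.mp h).1
      subst hL
      exact (List.disjoint_of_nodup_append hnd) hkP' (by simp)
    have hany := pcAny_iff L P R' k hnd hdesc hL
    rw [List.foldl_cons]
    rcases hkeep : pcKeep L k with _ | _
    · -- k is dropped: A's any fires, state unchanged
      have : pcStep (P.filter (pcKeep L), P.filter (pcKeep L)) k
          = (P.filter (pcKeep L), P.filter (pcKeep L)) := by
        rw [pcStep, hany, hkeep]; simp
      rw [this]
      have hfilt : P.filter (pcKeep L) = (P ++ [k]).filter (pcKeep L) := by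
        simp [List.filter_append, hkeep]
      rw [hfilt]
      exact ih (P ++ [k]) (by simp [hL])
    · -- k is kept: A appends it
      have : pcStep (P.filter (pcKeep L), P.filter (pcKeep L)) k
          = (P.filter (pcKeep L) ++ [k], P.filter (pcKeep L) ++ [k]) := by
        rw [pcStep, hany, hkeep]
        simp only [Bool.not_true, if_true, Bool.not_false]
        rw [PySem.Set.add, if_neg (by simpa using hkP)]
      rw [this]
      have hfilt : P.filter (pcKeep L) ++ [k] = (P ++ [k]).filter (pcKeep L) := by
        simp [List.filter_append, hkeep]
      rw [hfilt]
      exact ih (P ++ [k]) (by simp [hL])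

-- ===== VERDICT (by name: the statement is the Claim_ definition above) =====
theorem process_candidates_spec : Claim_equal_process_candidates := by
  intro candidates _
  have hnd : (PySem.List.sorted (PySem.List.dedup (candidates.map Prod.fst))
      (fun x => -PySem.Str.len x)).Nodup :=
    ((PySem.List.sorted_perm _ _ _).nodup_iff).mpr (PySem.List.nodup_dedup _)
  have hdesc : (PySem.List.sorted (PySem.List.dedup (candidates.map Prod.fst))
      (fun x => -PySem.Str.len x)).Pairwise
      (fun a b => PySem.Str.len b ≤ PySem.Str.len a) := by
    have := PySem.List.sorted_pairwise (PySem.List.dedup (candidates.map Prod.fst))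
      (fun x => -PySem.Str.len x)
    exact this.imp (by intro a b h; omega)
  exact pcLoop_eq _ hnd hdesc _ [] rfl
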